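-- pv_equiv track=rewrite | github.com/ifarobi/servertui | src/servertui/core.py | _quote_env_value
-- ===== SOURCE A (Python) =====
-- def _quote_env_value(value: str) -> str:
--     """Emit a .env-compatible serialization of value."""
--     if value == "":
--         return ""
--     safe = set("abcdefghijklmnopqrstuvwxyzABCDEFGHIJKLMNOPQRSTUVWXYZ"
--                "0123456789_./:@+-")
--     if all(ch in safe for ch in value):
--         return value
--     escaped = (value.replace("\\", "\\\\")
--                     .replace('"', '\\"')
--                     .replace("\n", "\\n")
--                     .replace("\r", "\\r")
--                     .replace("\t", "\\t"))
--     return f'"{escaped}"'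
-- ===== SOURCE B (Python) =====
-- _SAFE = ("abcdefghijklmnopqrstuvwxyzABCDEFGHIJKLMNOPQRSTUVWXYZ"
--          "0123456789_./:@+-")
-- _ESCAPES = {"\\": "\\\\", '"': '\\"', "\n": "\\n", "\r": "\\r", "\t": "\\t"}
--
--
-- def _quote_env_value(value: str) -> str:
--     """Emit a .env-compatible serialization of value."""
--     if value == "":
--         return ""
--     out = []
--     safe = True
--     for ch in value:
--         out.append(_ESCAPES.get(ch, ch))
--         if ch not in _SAFE:
--             safe = False
--     if safe:
--         return value
--     return '"' + "".join(out) + '"'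
-- ===== Notes on version B (the rewrite author's own statement) =====
-- stated objective: alternative
-- what changed: Replaced the five chained full-string .replace() passes with a single traversal that maps each character through an escape table and tracks safety in the same loop.
import Mathlib
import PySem

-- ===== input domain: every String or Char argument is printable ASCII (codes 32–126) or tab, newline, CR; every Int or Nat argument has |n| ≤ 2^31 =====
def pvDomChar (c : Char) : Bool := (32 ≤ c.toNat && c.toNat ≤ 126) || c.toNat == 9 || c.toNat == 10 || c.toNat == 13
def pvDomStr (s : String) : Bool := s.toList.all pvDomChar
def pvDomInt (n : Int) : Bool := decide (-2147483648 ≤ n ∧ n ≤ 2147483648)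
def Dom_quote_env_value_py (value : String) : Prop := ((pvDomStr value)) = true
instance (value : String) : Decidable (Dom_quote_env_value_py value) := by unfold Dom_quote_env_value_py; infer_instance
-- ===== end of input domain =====

-- B replaces A's five chained full-string .replace() passes by one traversal with an
-- escape table, tracking safety in the same loop (objective: alternative, same cost).

-- ===== PORT A =====
-- the safe-character string literal of A
def pvSafeStr : String :=
  "abcdefghijklmnopqrstuvwxyzABCDEFGHIJKLMNOPQRSTUVWXYZ0123456789_./:@+-"

def quote_env_value_py (value : String) : String :=
  if value == "" then ""
  else
    let safe := PySem.Set.ofList pvSafeStr.toList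
    if value.toList.all (fun ch => PySem.Set.contains safe ch) then value
    else
      let escaped :=
        PySem.Str.replace
          (PySem.Str.replace
            (PySem.Str.replace
              (PySem.Str.replace
                (PySem.Str.replace value "\\" "\\\\")
                "\"" "\\\"")
              "\n" "\\n")
            "\r" "\\r")
          "\t" "\\t"
      -- f'"{escaped}"': concatenation written on the char list (exact)
      String.ofList ('"' :: escaped.toList ++ ['"'])

-- ===== PORT B =====
-- B's escape table (_ESCAPES); values as char lists
def pvEscTable : PySem.Dict Char (List Char) :=
  PySem.Dict.ofList
    [('\\', ['\\','\\']), ('"', ['\\','"']), ('\n', ['\\','n']), ('\r', ['\\','r']), ('\t', ['\\','t'])]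

def quote_env_value_py_alt (value : String) : String :=
  if value == "" then ""
  else
    -- one pass: out accumulates _ESCAPES.get(ch, ch); safe is cleared when ch not in _SAFE
    let st := value.toList.foldl
      (fun (s : List Char × Bool) ch =>
        (s.1 ++ (PySem.Dict.get? pvEscTable ch).getD [ch],
         if PySem.Chars.isIn [ch] pvSafeStr.toList then s.2 else false))
      ([], true)
    if st.2 then value
    else String.ofList ('"' :: st.1 ++ ['"'])

-- ===== PRECONDITION & SPEC =====
def Spec_quote_env_value_py (value : String) (out : String) : Prop := out = quote_env_value_py_alt value
instance (value : String) (out : String) : Decidable (Spec_quote_env_value_py value out) := by unfold Spec_quote_env_value_py; infer_instance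

-- ===== CLAIM (what is proved, stated in full; the proofs are below) =====
def Claim_equal_quote_env_value_py : Prop := ∀ (value : String), Dom_quote_env_value_py value → Spec_quote_env_value_py value (quote_env_value_py value)

-- ===== LEMMAS AND PROOFS =====

-- per-character substitution performed by one .replace with a single-char pattern
def pvSubst (o : Char) (new : List Char) (c : Char) : List Char :=
  if c = o then new else [c]

theorem pv_go_single (o : Char) (new : List Char) :
    ∀ (l : List Char) (fuel : Nat) (acc : List Char), l.length ≤ fuel →
      PySem.Chars.replace.go [o] new fuel l acc = acc.reverse ++ l.flatMap (pvSubst o new) := by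
  intro l
  induction l with
  | nil =>
    intro fuel acc _
    cases fuel <;> simp [PySem.Chars.replace.go]
  | cons c t ih =>
    intro fuel acc h
    cases fuel with
    | zero => simp at h
    | succ f =>
      rw [PySem.Chars.replace.go]
      by_cases hc : c = o
      · subst hc
        simp [List.isPrefixOf]
        rw [ih f (new.reverse ++ acc) (by simpa using h)]
        simp [pvSubst]
      · have hp : [o].isPrefixOf (c :: t) = false := by
          simp [List.isPrefixOf]; exact fun h' => (hc h'.symm).elim
        simp [hp, pvSubst, hc]
        rw [ih f (c :: acc) (by simpa using h)]
        simp

theorem pv_replace_single (o : Char) (new : List Char) (s : List Char) :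
    PySem.Chars.replace s [o] new = s.flatMap (pvSubst o new) := by
  rw [PySem.Chars.replace]
  simp [pv_go_single o new s s.length [] (le_refl _)]

-- B's table lookup on a char outside the table is the identity
theorem pv_table_other (c : Char) (h1 : c ≠ '\\') (h2 : c ≠ '"') (h3 : c ≠ '\n')
    (h4 : c ≠ '\r') (h5 : c ≠ '\t') :
    (PySem.Dict.get? pvEscTable c).getD [c] = [c] := by
  have hit : pvEscTable.items =
      [('\\', ['\\','\\']), ('"', ['\\','"']), ('\n', ['\\','n']), ('\r', ['\\','r']), ('\t', ['\\','t'])] := by decide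
  have e : ∀ (a : Char) (v : List Char) (rest : List (Char × List Char)), a ≠ c →
      List.find? (fun p => p.1 == c) ((a,v)::rest) = List.find? (fun p => p.1 == c) rest := by
    intro a v rest h
    exact List.find?_cons_of_neg (by simp [h])
  simp only [PySem.Dict.get?, hit]
  rw [e _ _ _ (Ne.symm h1), e _ _ _ (Ne.symm h2), e _ _ _ (Ne.symm h3), e _ _ _ (Ne.symm h4),
    e _ _ _ (Ne.symm h5)]
  simp

-- the five chained substitutions, applied to one char, equal B's table lookup
theorem pv_chain_char (c : Char) :
    ((((pvSubst '\\' ['\\','\\'] c).flatMap (pvSubst '"' ['\\','"'])).flatMap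
        (pvSubst '\n' ['\\','n'])).flatMap (pvSubst '\r' ['\\','r'])).flatMap
      (pvSubst '\t' ['\\','t']) = (PySem.Dict.get? pvEscTable c).getD [c] := by
  by_cases h1 : c = '\\'
  · subst h1; decide
  by_cases h2 : c = '"'
  · subst h2; decide
  by_cases h3 : c = '\n'
  · subst h3; decide
  by_cases h4 : c = '\r'
  · subst h4; decide
  by_cases h5 : c = '\t'
  · subst h5; decide
  rw [pv_table_other c h1 h2 h3 h4 h5]
  simp [pvSubst, h1, h2, h3, h4, h5]

-- A's escaped string, as a single flatMap over the original characters
theorem pv_chain_list (s : List Char) :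
    ((((s.flatMap (pvSubst '\\' ['\\','\\'])).flatMap (pvSubst '"' ['\\','"'])).flatMap
        (pvSubst '\n' ['\\','n'])).flatMap (pvSubst '\r' ['\\','r'])).flatMap
      (pvSubst '\t' ['\\','t'])
    = s.flatMap (fun c => (PySem.Dict.get? pvEscTable c).getD [c]) := by
  induction s with
  | nil => simp
  | cons c t ih =>
    simp only [List.flatMap_cons, List.flatMap_append]
    rw [ih, pv_chain_char c]

-- B's one-pass fold computes the flatMap and the all-safe flag
theorem pv_fold_spec (l : List Char) : ∀ (acc : List Char) (b : Bool),
    l.foldl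
      (fun (s : List Char × Bool) ch =>
        (s.1 ++ (PySem.Dict.get? pvEscTable ch).getD [ch],
         if PySem.Chars.isIn [ch] pvSafeStr.toList then s.2 else false))
      (acc, b)
    = (acc ++ l.flatMap (fun c => (PySem.Dict.get? pvEscTable c).getD [c]),
       b && l.all (fun ch => PySem.Chars.isIn [ch] pvSafeStr.toList)) := by
  induction l with
  | nil => intro acc b; simp
  | cons c t ih =>
    intro acc b
    simp only [List.foldl_cons, ih]
    by_cases h : PySem.Chars.isIn [c] pvSafeStr.toList
    · simp [h]
    · simp [h, Bool.false_and]

-- A's set-membership test equals B's substring test, per character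
theorem pv_safe_eq (c : Char) :
    PySem.Set.contains (PySem.Set.ofList pvSafeStr.toList) c
      = PySem.Chars.isIn [c] pvSafeStr.toList := by
  rcases h : PySem.Chars.isIn [c] pvSafeStr.toList with _ | _
  · have hm : c ∉ pvSafeStr.toList := fun hc =>
      (PySem.Chars.isIn_eq_false_iff [c] pvSafeStr.toList).mp h
        ((List.singleton_infix_iff c _).mpr hc)
    rcases hcon : PySem.Set.contains (PySem.Set.ofList pvSafeStr.toList) c with _ | _
    · rfl
    · exact (hm ((PySem.Set.mem_ofList _ _).mp ((PySem.Set.contains_iff _ _).mp hcon))).elim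
  · have hm : c ∈ pvSafeStr.toList :=
      (List.singleton_infix_iff c _).mp ((PySem.Chars.isIn_iff_infix _ _).mp h)
    exact (PySem.Set.contains_iff _ _).mpr ((PySem.Set.mem_ofList _ _).mpr hm)

-- ===== VERDICT (by name: the statement is the Claim_ definition above) =====
set_option maxHeartbeats 1000000 in
theorem quote_env_value_py_spec : Claim_equal_quote_env_value_py := by
  intro value _
  unfold Spec_quote_env_value_py quote_env_value_py quote_env_value_py_alt
  by_cases hv : value == ""
  · simp [hv]
  simp only [hv, Bool.false_eq_true, if_false]
  rw [pv_fold_spec value.toList [] true]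
  simp only [List.nil_append, Bool.true_and]
  have hall : (fun ch => PySem.Set.contains (PySem.Set.ofList pvSafeStr.toList) ch)
      = (fun ch => PySem.Chars.isIn [ch] pvSafeStr.toList) := funext pv_safe_eq
  rw [hall]
  rcases hC : value.toList.all (fun ch => PySem.Chars.isIn [ch] pvSafeStr.toList) with _ | _
  · simp only [Bool.false_eq_true, if_false]
    refine congrArg String.ofList ?_
    refine congrArg (fun l => '"' :: l ++ ['"']) ?_
    have hbs : ("\\" : String).toList = ['\\'] := by decide
    have hbb : ("\\\\" : String).toList = ['\\','\\'] := by decide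
    have hq : ("\"" : String).toList = ['"'] := by decide
    have hbq : ("\\\"" : String).toList = ['\\','"'] := by decide
    have hn : ("\n" : String).toList = ['\n'] := by decide
    have hbn : ("\\n" : String).toList = ['\\','n'] := by decide
    have hr : ("\r" : String).toList = ['\r'] := by decide
    have hbr : ("\\r" : String).toList = ['\\','r'] := by decide
    have ht : ("\t" : String).toList = ['\t'] := by decide
    have hbt : ("\\t" : String).toList = ['\\','t'] := by decide
    simp only [PySem.Str.toList_replace, hbs, hbb, hq, hbq, hn, hbn, hr, hbr, ht, hbt,
      pv_replace_single]
    rw [pv_chain_list]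
  · simp only [if_true]
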